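-- pv_equiv track=rewrite | github.com/Beit-Hatfutsot/dbs-front | redirector/app/redirector/web.py | find_matching_row
-- ===== SOURCE A (Python) =====
-- def find_matching_row(rows, OldUnitId, UnitId, Header_He, Header_En, name_lc):
--     if UnitId:
--         for row in rows:
--             if row['bhp_unit'] == UnitId:
--                 return row
--     if OldUnitId:
--         for row in rows:
--             if row['old_num'] == OldUnitId:
--                 return row
--     if Header_He and Header_En:
--         for row in rows:
--             if row['name_he'] == Header_He and row['name_en'] == Header_En:
--                 return row
--         for row in rows:
--             if row['name_he'].lower() == Header_He.lower() and row['name_en'].lower() == Header_En.lower():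
--                 return row
--     if Header_He or Header_En:
--         for row in rows:
--             if row['name_he'].lower() == Header_He.lower() or row['name_en'].lower() == Header_En.lower():
--                 return row
--     if name_lc:
--         for row in rows:
--             if row['name_he'].lower() == name_lc.lower() or row['name_en'].lower() == name_lc.lower():
--                 return row
--     return None
-- ===== SOURCE B (Python) =====
-- def find_matching_row(rows, OldUnitId, UnitId, Header_He, Header_En, name_lc):
--     # Single pass over rows: record the first row matching each enabled
--     # criterion tier, then return the hit of the highest-priority tier.
--     both = bool(Header_He) and bool(Header_En)
--     either = bool(Header_He) or bool(Header_En)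
--     he_l = (Header_He or '').lower()
--     en_l = (Header_En or '').lower()
--     nm_l = (name_lc or '').lower()
--     hits = [None] * 6
--     for row in rows:
--         nh = row.get('name_he', '')
--         ne = row.get('name_en', '')
--         nh_l = nh.lower()
--         ne_l = ne.lower()
--         if UnitId and hits[0] is None and row.get('bhp_unit', '') == UnitId:
--             hits[0] = row
--         if OldUnitId and hits[1] is None and row.get('old_num', '') == OldUnitId:
--             hits[1] = row
--         if both and hits[2] is None and nh == Header_He and ne == Header_En:
--             hits[2] = row
--         if both and hits[3] is None and nh_l == he_l and ne_l == en_l: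
--             hits[3] = row
--         if either and hits[4] is None and (nh_l == he_l or ne_l == en_l):
--             hits[4] = row
--         if name_lc and hits[5] is None and (nh_l == nm_l or ne_l == nm_l):
--             hits[5] = row
--     for h in hits:
--         if h is not None:
--             return h
--     return None
-- ===== Notes on version B (the rewrite author's own statement) =====
-- stated objective: alternative
-- what changed: A's up-to-six sequential early-return scans over rows are replaced by a single pass that accumulates the first hit of each enabled criterion tier in a six-slot accumulator (lowercasing each row's names once), then returns the highest-priority tier's hit.
import Mathlib
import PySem

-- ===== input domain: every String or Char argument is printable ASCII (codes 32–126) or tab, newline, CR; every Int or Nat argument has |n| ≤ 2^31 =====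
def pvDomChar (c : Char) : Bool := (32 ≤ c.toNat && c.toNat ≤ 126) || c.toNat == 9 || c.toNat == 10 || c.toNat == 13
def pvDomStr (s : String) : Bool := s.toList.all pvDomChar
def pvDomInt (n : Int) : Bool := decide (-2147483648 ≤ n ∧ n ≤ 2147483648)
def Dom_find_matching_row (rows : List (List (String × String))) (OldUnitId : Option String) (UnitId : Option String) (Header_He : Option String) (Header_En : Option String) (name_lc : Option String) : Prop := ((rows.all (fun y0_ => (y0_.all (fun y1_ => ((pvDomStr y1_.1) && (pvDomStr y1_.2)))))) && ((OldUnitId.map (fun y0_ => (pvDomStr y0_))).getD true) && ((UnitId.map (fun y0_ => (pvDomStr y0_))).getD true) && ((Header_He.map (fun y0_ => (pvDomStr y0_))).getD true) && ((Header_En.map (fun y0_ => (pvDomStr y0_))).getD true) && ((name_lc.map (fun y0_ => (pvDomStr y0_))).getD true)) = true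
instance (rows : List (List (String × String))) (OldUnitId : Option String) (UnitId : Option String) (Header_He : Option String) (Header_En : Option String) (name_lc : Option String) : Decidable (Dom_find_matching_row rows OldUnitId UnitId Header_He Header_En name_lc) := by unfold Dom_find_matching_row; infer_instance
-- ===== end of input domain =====

-- ===== PORT A =====
-- B replaces A's up-to-six sequential scans over the rows by ONE pass that
-- accumulates the first hit of each enabled criterion tier, then picks the
-- highest-priority tier's hit (objective: alternative).  Equivalence is about
-- the RETURN value; neither version mutates its arguments.

-- Python truthiness of an optional string (None and "" are falsy).
def pvTruthy (o : Option String) : Bool :=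
  match o with
  | none => false
  | some s => !(s == "")

-- row[k] for an association-list row; Pre_ guarantees the key is present
-- wherever the Python performs the lookup, so the default is never observed.
def aGet : List (String × String) → String → String
  | [], _ => ""
  | (k', v) :: rest, k => if k' == k then v else aGet rest k

def loopUnit : List (List (String × String)) → String → Option (List (String × String))
  | [], _ => none
  | r :: rs, u => if aGet r "bhp_unit" == u then some r else loopUnit rs u

def loopOld : List (List (String × String)) → String → Option (List (String × String))
  | [], _ => none
  | r :: rs, o => if aGet r "old_num" == o then some r else loopOld rs o

def loopExact : List (List (String × String)) → String → String → Option (List (String × String))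
  | [], _, _ => none
  | r :: rs, he, en =>
      if aGet r "name_he" == he && aGet r "name_en" == en then some r else loopExact rs he en

def loopLowerAnd : List (List (String × String)) → String → String → Option (List (String × String))
  | [], _, _ => none
  | r :: rs, he, en =>
      if PySem.Str.lower (aGet r "name_he") == PySem.Str.lower he &&
         PySem.Str.lower (aGet r "name_en") == PySem.Str.lower en
      then some r else loopLowerAnd rs he en

def loopLowerOr : List (List (String × String)) → String → String → Option (List (String × String))
  | [], _, _ => none
  | r :: rs, he, en =>
      if PySem.Str.lower (aGet r "name_he") == PySem.Str.lower he ||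
         PySem.Str.lower (aGet r "name_en") == PySem.Str.lower en
      then some r else loopLowerOr rs he en

def loopName : List (List (String × String)) → String → Option (List (String × String))
  | [], _ => none
  | r :: rs, n =>
      if PySem.Str.lower (aGet r "name_he") == PySem.Str.lower n ||
         PySem.Str.lower (aGet r "name_en") == PySem.Str.lower n
      then some r else loopName rs n

def find_matching_row (rows : List (List (String × String))) (OldUnitId : Option String) (UnitId : Option String) (Header_He : Option String) (Header_En : Option String) (name_lc : Option String) : Option (List (String × String)) :=
  (if pvTruthy UnitId then loopUnit rows (UnitId.getD "") else none).or
  ((if pvTruthy OldUnitId then loopOld rows (OldUnitId.getD "") else none).or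
  ((if pvTruthy Header_He && pvTruthy Header_En then
      (loopExact rows (Header_He.getD "") (Header_En.getD "")).or
        (loopLowerAnd rows (Header_He.getD "") (Header_En.getD ""))
    else none).or
  ((if pvTruthy Header_He || pvTruthy Header_En then
      loopLowerOr rows (Header_He.getD "") (Header_En.getD "") else none).or
  (if pvTruthy name_lc then loopName rows (name_lc.getD "") else none))))

-- ===== PORT B =====

-- row.get(k, '') in B's style (first match in the association list).
def bGet (k : String) (row : List (String × String)) : String :=
  (List.lookup k row).getD ""

-- B's per-row accumulator update: the six `if … and hits[i] is None and …` statements.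
def bStep (UnitId OldUnitId HeaderHe HeaderEn : String)
    (en0 en1 both either en5 : Bool) (heL enL nmL : String)
    (h : Option (List (String × String)) × Option (List (String × String)) ×
         Option (List (String × String)) × Option (List (String × String)) ×
         Option (List (String × String)) × Option (List (String × String)))
    (row : List (String × String)) :
    Option (List (String × String)) × Option (List (String × String)) ×
    Option (List (String × String)) × Option (List (String × String)) ×
    Option (List (String × String)) × Option (List (String × String)) :=
  let nh := bGet "name_he" row
  let ne := bGet "name_en" row
  let nhL := PySem.Str.lower nh
  let neL := PySem.Str.lower ne
  ( if en0 && h.1.isNone && (bGet "bhp_unit" row == UnitId) then some row else h.1,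
    if en1 && h.2.1.isNone && (bGet "old_num" row == OldUnitId) then some row else h.2.1,
    if both && h.2.2.1.isNone && (nh == HeaderHe && ne == HeaderEn) then some row else h.2.2.1,
    if both && h.2.2.2.1.isNone && (nhL == heL && neL == enL) then some row else h.2.2.2.1,
    if either && h.2.2.2.2.1.isNone && (nhL == heL || neL == enL) then some row else h.2.2.2.2.1,
    if en5 && h.2.2.2.2.2.isNone && (nhL == nmL || neL == nmL) then some row else h.2.2.2.2.2 )

def find_matching_row_alt (rows : List (List (String × String))) (OldUnitId : Option String) (UnitId : Option String) (Header_He : Option String) (Header_En : Option String) (name_lc : Option String) : Option (List (String × String)) :=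
  let both := pvTruthy Header_He && pvTruthy Header_En
  let either := pvTruthy Header_He || pvTruthy Header_En
  let heL := PySem.Str.lower (Header_He.getD "")
  let enL := PySem.Str.lower (Header_En.getD "")
  let nmL := PySem.Str.lower (name_lc.getD "")
  let h := rows.foldl
    (bStep (UnitId.getD "") (OldUnitId.getD "") (Header_He.getD "") (Header_En.getD "")
      (pvTruthy UnitId) (pvTruthy OldUnitId) both either (pvTruthy name_lc) heL enL nmL)
    (none, none, none, none, none, none)
  h.1.or (h.2.1.or (h.2.2.1.or (h.2.2.2.1.or (h.2.2.2.2.1.or h.2.2.2.2.2))))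

-- ===== PRECONDITION & SPEC =====
-- Pre_ excludes the inputs on which Python A raises: a KeyError when the scan
-- that is actually reached meets a row lacking its key before any match, and an
-- AttributeError (None.lower()) when a header criterion is reached on nonempty
-- rows while one header is None; it also excludes rows with duplicate keys,
-- where the dict ↔ association-list reading is ambiguous.  It is slightly
-- narrower than A's exact returning domain on one corner: with one header None
-- and the other non-empty, A can still return if its very first comparison
-- matches before None.lower() is reached (see the cite in the claim).
def hasKeyB (k : String) (row : List (String × String)) : Bool :=
  (List.lookup k row).isSome

-- the chained "no scan that A reaches raises" condition, stated over prefixes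
-- of rows (takeWhile) and matches within them — not by running either port
def preScansOk (rows : List (List (String × String))) (OldUnitId : Option String) (UnitId : Option String) (Header_He : Option String) (Header_En : Option String) (name_lc : Option String) : Bool :=
  let f1 := pvTruthy UnitId &&
    (rows.takeWhile (hasKeyB "bhp_unit")).any (fun r => bGet "bhp_unit" r == UnitId.getD "")
  let ok1 := !(pvTruthy UnitId) || f1 || rows.all (hasKeyB "bhp_unit")
  let f2 := pvTruthy OldUnitId &&
    (rows.takeWhile (hasKeyB "old_num")).any (fun r => bGet "old_num" r == OldUnitId.getD "")
  let ok2 := !(pvTruthy OldUnitId) || f2 || rows.all (hasKeyB "old_num")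
  let nn := pvTruthy Header_He || pvTruthy Header_En || pvTruthy name_lc
  let hasBoth := fun r => hasKeyB "name_he" r && hasKeyB "name_en" r
  let fp : List (String × String) → Bool :=
    if pvTruthy Header_He && pvTruthy Header_En then
      fun r => bGet "name_he" r == Header_He.getD "" && bGet "name_en" r == Header_En.getD ""
    else if pvTruthy Header_He || pvTruthy Header_En then
      fun r => PySem.Str.lower (bGet "name_he" r) == PySem.Str.lower (Header_He.getD "") ||
               PySem.Str.lower (bGet "name_en" r) == PySem.Str.lower (Header_En.getD "")
    else
      fun r => PySem.Str.lower (bGet "name_he" r) == PySem.Str.lower (name_lc.getD "") ||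
               PySem.Str.lower (bGet "name_en" r) == PySem.Str.lower (name_lc.getD "")
  let okN := !nn || rows.all hasBoth || (rows.takeWhile hasBoth).any fp
  let okH := !((pvTruthy Header_He || pvTruthy Header_En) && !rows.isEmpty) ||
             (Header_He.isSome && Header_En.isSome)
  ok1 && (f1 || (ok2 && (f2 || (okN && okH))))

def Pre_find_matching_row (rows : List (List (String × String))) (OldUnitId : Option String) (UnitId : Option String) (Header_He : Option String) (Header_En : Option String) (name_lc : Option String) : Prop :=
  ((pvTruthy UnitId = true ∨ pvTruthy OldUnitId = true ∨ pvTruthy Header_He = true ∨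
      pvTruthy Header_En = true ∨ pvTruthy name_lc = true) →
     ∀ row ∈ rows, (row.map Prod.fst).Nodup) ∧
  preScansOk rows OldUnitId UnitId Header_He Header_En name_lc = true
instance (rows : List (List (String × String))) (OldUnitId : Option String) (UnitId : Option String) (Header_He : Option String) (Header_En : Option String) (name_lc : Option String) : Decidable (Pre_find_matching_row rows OldUnitId UnitId Header_He Header_En name_lc) := by unfold Pre_find_matching_row; infer_instance

def pvWitness_find_matching_row : (List (List (String × String))) × Option String × Option String × Option String × Option String × Option String :=
  ([[("bhp_unit", "7"), ("old_num", "3"), ("name_he", "Ab"), ("name_en", "Cd")]],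
   some "3", some "7", some "ab", some "cd", none)

def Spec_find_matching_row (rows : List (List (String × String))) (OldUnitId : Option String) (UnitId : Option String) (Header_He : Option String) (Header_En : Option String) (name_lc : Option String) (out : Option (List (String × String))) : Prop := out = find_matching_row_alt rows OldUnitId UnitId Header_He Header_En name_lc
instance (rows : List (List (String × String))) (OldUnitId : Option String) (UnitId : Option String) (Header_He : Option String) (Header_En : Option String) (name_lc : Option String) (out : Option (List (String × String))) : Decidable (Spec_find_matching_row rows OldUnitId UnitId Header_He Header_En name_lc out) := by unfold Spec_find_matching_row; infer_instance

-- ===== CLAIM (what is proved, stated in full; the proofs are below) =====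
def Claim_equal_find_matching_row : Prop := ∀ (rows : List (List (String × String))) (OldUnitId : Option String) (UnitId : Option String) (Header_He : Option String) (Header_En : Option String) (name_lc : Option String), Dom_find_matching_row rows OldUnitId UnitId Header_He Header_En name_lc → Pre_find_matching_row rows OldUnitId UnitId Header_He Header_En name_lc → Spec_find_matching_row rows OldUnitId UnitId Header_He Header_En name_lc (find_matching_row rows OldUnitId UnitId Header_He Header_En name_lc)

-- ===== LEMMAS AND PROOFS =====

theorem aGet_eq_bGet (row : List (String × String)) (k : String) : aGet row k = bGet k row := by
  induction row with
  | nil => rfl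
  | cons kv rest ih =>
      obtain ⟨k', v⟩ := kv
      by_cases h : k' = k
      · subst h; simp [aGet, bGet, List.lookup]
      · have h1 : (k' == k) = false := by simp [h]
        have h2 : (k == k') = false := by simp [Ne.symm h]
        simp [aGet, bGet, List.lookup, h1, h2, ih]

-- B's generic "first row satisfying p" (the value hits[i] converges to).
def bFirst (rows : List (List (String × String))) (p : List (String × String) → Bool) : Option (List (String × String)) :=
  match rows with
  | [] => none
  | r :: rs => if p r then some r else bFirst rs p

-- one accumulator cell after absorbing row r, then the rest of the scan
theorem cell_step (en : Bool) (p : List (String × String) → Bool)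
    (r : List (String × String)) (rs : List (List (String × String)))
    (a : Option (List (String × String))) :
    ((if en && a.isNone && p r then some r else a).or (if en then bFirst rs p else none)) =
      a.or (if en then bFirst (r :: rs) p else none) := by
  cases en <;> cases a <;> cases h : p r <;> simp [bFirst, h]

-- the single fold computes, componentwise, "old value, else first hit of the tier"
theorem foldl_bStep_eq (UnitId OldUnitId HeaderHe HeaderEn : String)
    (en0 en1 both either en5 : Bool) (heL enL nmL : String) :
    ∀ (rows : List (List (String × String)))
      (h : Option (List (String × String)) × Option (List (String × String)) ×
           Option (List (String × String)) × Option (List (String × String)) ×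
           Option (List (String × String)) × Option (List (String × String))),
    rows.foldl (bStep UnitId OldUnitId HeaderHe HeaderEn en0 en1 both either en5 heL enL nmL) h =
      ( h.1.or (if en0 then bFirst rows (fun row => bGet "bhp_unit" row == UnitId) else none),
        h.2.1.or (if en1 then bFirst rows (fun row => bGet "old_num" row == OldUnitId) else none),
        h.2.2.1.or (if both then bFirst rows
          (fun row => bGet "name_he" row == HeaderHe && bGet "name_en" row == HeaderEn) else none),
        h.2.2.2.1.or (if both then bFirst rows
          (fun row => PySem.Str.lower (bGet "name_he" row) == heL &&
                      PySem.Str.lower (bGet "name_en" row) == enL) else none),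
        h.2.2.2.2.1.or (if either then bFirst rows
          (fun row => PySem.Str.lower (bGet "name_he" row) == heL ||
                      PySem.Str.lower (bGet "name_en" row) == enL) else none),
        h.2.2.2.2.2.or (if en5 then bFirst rows
          (fun row => PySem.Str.lower (bGet "name_he" row) == nmL ||
                      PySem.Str.lower (bGet "name_en" row) == nmL) else none) ) := by
  intro rows
  induction rows with
  | nil => intro h; simp [bFirst]
  | cons r rs ih =>
      intro h
      obtain ⟨a0, a1, a2, a3, a4, a5⟩ := h
      simp only [List.foldl_cons, ih, bStep, Prod.mk.injEq]
      refine ⟨cell_step en0 (fun row => bGet "bhp_unit" row == UnitId) r rs a0,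
        cell_step en1 (fun row => bGet "old_num" row == OldUnitId) r rs a1,
        cell_step both (fun row => bGet "name_he" row == HeaderHe && bGet "name_en" row == HeaderEn) r rs a2,
        cell_step both (fun row => PySem.Str.lower (bGet "name_he" row) == heL &&
          PySem.Str.lower (bGet "name_en" row) == enL) r rs a3,
        cell_step either (fun row => PySem.Str.lower (bGet "name_he" row) == heL ||
          PySem.Str.lower (bGet "name_en" row) == enL) r rs a4,
        cell_step en5 (fun row => PySem.Str.lower (bGet "name_he" row) == nmL ||
          PySem.Str.lower (bGet "name_en" row) == nmL) r rs a5⟩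

theorem loopUnit_eq (rows : List (List (String × String))) (u : String) :
    loopUnit rows u = bFirst rows (fun row => bGet "bhp_unit" row == u) := by
  induction rows with
  | nil => rfl
  | cons r rs ih => simp [loopUnit, bFirst, aGet_eq_bGet, ih]

theorem loopOld_eq (rows : List (List (String × String))) (o : String) :
    loopOld rows o = bFirst rows (fun row => bGet "old_num" row == o) := by
  induction rows with
  | nil => rfl
  | cons r rs ih => simp [loopOld, bFirst, aGet_eq_bGet, ih]

theorem loopExact_eq (rows : List (List (String × String))) (he en : String) :
    loopExact rows he en =
      bFirst rows (fun row => bGet "name_he" row == he && bGet "name_en" row == en) := by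
  induction rows with
  | nil => rfl
  | cons r rs ih => simp [loopExact, bFirst, aGet_eq_bGet, ih]

theorem loopLowerAnd_eq (rows : List (List (String × String))) (he en : String) :
    loopLowerAnd rows he en =
      bFirst rows (fun row => PySem.Str.lower (bGet "name_he" row) == PySem.Str.lower he &&
                              PySem.Str.lower (bGet "name_en" row) == PySem.Str.lower en) := by
  induction rows with
  | nil => rfl
  | cons r rs ih => simp [loopLowerAnd, bFirst, aGet_eq_bGet, ih]

theorem loopLowerOr_eq (rows : List (List (String × String))) (he en : String) :
    loopLowerOr rows he en =
      bFirst rows (fun row => PySem.Str.lower (bGet "name_he" row) == PySem.Str.lower he ||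
                              PySem.Str.lower (bGet "name_en" row) == PySem.Str.lower en) := by
  induction rows with
  | nil => rfl
  | cons r rs ih => simp [loopLowerOr, bFirst, aGet_eq_bGet, ih]

theorem loopName_eq (rows : List (List (String × String))) (n : String) :
    loopName rows n =
      bFirst rows (fun row => PySem.Str.lower (bGet "name_he" row) == PySem.Str.lower n ||
                              PySem.Str.lower (bGet "name_en" row) == PySem.Str.lower n) := by
  induction rows with
  | nil => rfl
  | cons r rs ih => simp [loopName, bFirst, aGet_eq_bGet, ih]

theorem or_if_distrib {T : Type} (c : Bool) (x y : Option T) :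
    (if c = true then x.or y else none) = (if c = true then x else none).or (if c = true then y else none) := by
  cases c <;> simp

-- ===== VERDICT (by name: the statement is the Claim_ definition above) =====
theorem find_matching_row_spec : Claim_equal_find_matching_row := by
  intro rows OldUnitId UnitId Header_He Header_En name_lc _ _
  unfold Spec_find_matching_row find_matching_row find_matching_row_alt
  simp only [foldl_bStep_eq, Option.none_or]
  simp only [loopUnit_eq, loopOld_eq, loopExact_eq, loopLowerAnd_eq, loopLowerOr_eq,
    loopName_eq, or_if_distrib, Option.or_assoc]
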